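-- pv_equiv track=rewrite | github.com/HaiyiMei/s2vt_transformer | misc/rewards.py | array_to_str
-- ===== SOURCE A (Python) =====
-- def array_to_str(arr):
--     out = ''
--     for i in range(len(arr)):
--         if arr[i] == 0:
--             break
--         if arr[i] == 1:
--             continue
--         out += str(arr[i]) + ' '
--     return out.strip()
-- ===== SOURCE B (Python) =====
-- def array_to_str(arr):
--     cut = len(arr)
--     for i, x in enumerate(arr):
--         if x == 0:
--             cut = i
--             break
--     parts = [str(x) for x in arr[:cut] if x != 1]
--     return ' '.join(parts)
-- ===== Notes on version B (the rewrite author's own statement) =====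
-- stated objective: idiomatic
-- what changed: Replaces the single merged loop (break on 0, skip 1, concatenate with trailing space, then strip) by a locate-the-first-zero pass followed by a filtered comprehension over the prefix slice and ' '.join, so no trailing-space bookkeeping or strip is needed.
import Mathlib
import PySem

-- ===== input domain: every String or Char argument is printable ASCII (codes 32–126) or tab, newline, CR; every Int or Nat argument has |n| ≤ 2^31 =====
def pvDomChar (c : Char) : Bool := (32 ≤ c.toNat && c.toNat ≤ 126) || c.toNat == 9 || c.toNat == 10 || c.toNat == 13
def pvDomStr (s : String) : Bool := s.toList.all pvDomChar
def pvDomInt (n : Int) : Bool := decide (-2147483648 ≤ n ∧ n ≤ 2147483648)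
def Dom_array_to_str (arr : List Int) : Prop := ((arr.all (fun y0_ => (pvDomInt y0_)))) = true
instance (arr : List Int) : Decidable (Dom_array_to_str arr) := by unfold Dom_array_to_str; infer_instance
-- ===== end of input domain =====

-- B replaces A's merged break/skip/concatenate-then-strip loop by locate-first-zero, then filter+join over the prefix (idiomatic; same cost).

-- ===== PORT A =====
-- the for-loop of A: break on 0, continue on 1, else append "str(x) + ' '" to out
def arrayToStrLoop : List Int → String → String
  | [], out => out
  | x :: rest, out =>
    if x == 0 then out
    else if x == 1 then arrayToStrLoop rest out
    else arrayToStrLoop rest (out ++ PySem.Int.toStr x ++ " ")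

def array_to_str (arr : List Int) : String :=
  PySem.Str.strip (arrayToStrLoop arr "")

-- ===== PORT B =====
-- B's first pass: index of the first element equal to 0, defaulting to len(arr)
def altCutLoop : List Int → Nat
  | [] => 0
  | x :: rest => if x == 0 then 0 else altCutLoop rest + 1

def array_to_str_alt (arr : List Int) : String :=
  let cut := altCutLoop arr
  PySem.Str.join " "
    (((PySem.List.slice arr none (some (cut : Int))).filter (fun x => !(x == 1))).map
      PySem.Int.toStr)

-- ===== PRECONDITION & SPEC =====
def Spec_array_to_str (arr : List Int) (out : String) : Prop := out = array_to_str_alt arr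
instance (arr : List Int) (out : String) : Decidable (Spec_array_to_str arr out) := by unfold Spec_array_to_str; infer_instance

-- ===== CLAIM (what is proved, stated in full; the proofs are below) =====
def Claim_equal_array_to_str : Prop := ∀ (arr : List Int), Dom_array_to_str arr → Spec_array_to_str arr (array_to_str arr)

-- ===== LEMMAS AND PROOFS =====

-- the list of rendered pieces both programs produce (proof-only helper)
def pvParts : List Int → List (List Char)
  | [] => []
  | x :: rest =>
    if x == 0 then []
    else if x == 1 then pvParts rest
    else PySem.Int.toChars x :: pvParts rest

theorem digitChar_not_space (m : Nat) (hm : m < 10) :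
    PySem.Chars.isspace (Nat.digitChar m) = false := by
  interval_cases m <;> decide

theorem toDigitsCore_mem (f : Nat) : ∀ (n : Nat) (acc : List Char) (c : Char),
    c ∈ Nat.toDigitsCore 10 f n acc → c ∈ acc ∨ ∃ m, m < 10 ∧ c = Nat.digitChar m := by
  induction f with
  | zero => intro n acc c h; exact Or.inl h
  | succ f ih =>
    intro n acc c h
    simp only [Nat.toDigitsCore] at h
    split at h
    · rcases List.mem_cons.mp h with h | h
      · exact Or.inr ⟨n % 10, Nat.mod_lt _ (by norm_num), h⟩
      · exact Or.inl h
    · rcases ih (n / 10) (Nat.digitChar (n % 10) :: acc) c h with h | h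
      · rcases List.mem_cons.mp h with h | h
        · exact Or.inr ⟨n % 10, Nat.mod_lt _ (by norm_num), h⟩
        · exact Or.inl h
      · exact Or.inr h

theorem toDigitsCore_len (f : Nat) : ∀ (n : Nat) (acc : List Char),
    acc.length ≤ (Nat.toDigitsCore 10 f n acc).length := by
  induction f with
  | zero => intro n acc; simp [Nat.toDigitsCore]
  | succ f ih =>
    intro n acc
    simp only [Nat.toDigitsCore]
    split
    · simp
    · calc acc.length ≤ (Nat.digitChar (n % 10) :: acc).length := by simp
        _ ≤ _ := ih (n / 10) _

theorem toDigits_ne_nil (n : Nat) : Nat.toDigits 10 n ≠ [] := by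
  have h : ([] : List Char).length < (Nat.toDigits 10 n).length := by
    unfold Nat.toDigits
    simp only [Nat.toDigitsCore]
    split
    · simp
    · calc (0 : Nat) < (Nat.digitChar (n % 10) :: []).length := by simp
        _ ≤ _ := toDigitsCore_len n _ _
  intro hnil
  rw [hnil] at h; simp at h

theorem toDigits_not_space (n : Nat) (c : Char) (hc : c ∈ Nat.toDigits 10 n) :
    PySem.Chars.isspace c = false := by
  rcases toDigitsCore_mem (n + 1) n [] c hc with h | ⟨m, hm, rfl⟩
  · simp at h
  · exact digitChar_not_space m hm

theorem toChars_ne_nil (x : Int) : PySem.Int.toChars x ≠ [] := by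
  unfold PySem.Int.toChars
  split
  · simp
  · exact toDigits_ne_nil _

theorem toChars_not_space (x : Int) (c : Char) (hc : c ∈ PySem.Int.toChars x) :
    PySem.Chars.isspace c = false := by
  unfold PySem.Int.toChars at hc
  split at hc
  · rcases List.mem_cons.mp hc with rfl | hc
    · decide
    · exact toDigits_not_space _ _ hc
  · exact toDigits_not_space _ _ hc

theorem pvParts_good (xs : List Int) : ∀ p ∈ pvParts xs,
    p ≠ [] ∧ ∀ c ∈ p, PySem.Chars.isspace c = false := by
  induction xs with
  | nil => simp [pvParts]
  | cons x rest ih =>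
    intro p hp
    simp only [pvParts] at hp
    split at hp
    · simp at hp
    · split at hp
      · exact ih p hp
      · rcases List.mem_cons.mp hp with rfl | hp
        · exact ⟨toChars_ne_nil x, toChars_not_space x⟩
        · exact ih p hp

-- rstrip helpers
theorem rstrip_eq_self (p : List Char) (h : ∀ c ∈ p, PySem.Chars.isspace c = false) :
    PySem.Chars.rstrip p = p := by
  unfold PySem.Chars.rstrip
  rw [List.dropWhile_eq_self_iff.mpr, List.reverse_reverse]
  intro hne
  rw [Bool.not_eq_true]
  exact h _ (List.mem_reverse.mp (List.getElem_mem (by simpa using hne)))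

theorem rstrip_append_space (s : List Char) :
    PySem.Chars.rstrip (s ++ [' ']) = PySem.Chars.rstrip s := by
  unfold PySem.Chars.rstrip
  rw [List.reverse_append]
  have hsp : PySem.Chars.isspace ' ' = true := by decide
  simp [hsp]

theorem rstrip_append_of_ne_nil (s t : List Char) (h : PySem.Chars.rstrip t ≠ []) :
    PySem.Chars.rstrip (s ++ t) = s ++ PySem.Chars.rstrip t := by
  unfold PySem.Chars.rstrip at *
  rw [List.reverse_append, List.dropWhile_append]
  have hne : (List.dropWhile PySem.Chars.isspace t.reverse).isEmpty = false := by
    rcases e : List.dropWhile PySem.Chars.isspace t.reverse with _ | ⟨c, cs⟩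
    · exact absurd (by simp [e]) h
    · simp
  rw [hne]
  simp

theorem rstrip_flatten (ps : List (List Char)) (hne : ps ≠ [])
    (h : ∀ p ∈ ps, p ≠ [] ∧ ∀ c ∈ p, PySem.Chars.isspace c = false) :
    PySem.Chars.rstrip ((ps.map (· ++ [' '])).flatten) = PySem.Chars.join [' '] ps := by
  induction ps with
  | nil => exact absurd rfl hne
  | cons p ps ih =>
    obtain ⟨hp, hps⟩ := h p (by simp)
    rcases ps with _ | ⟨q, qs⟩
    · simp only [List.map_cons, List.map_nil, List.flatten_cons, List.flatten_nil,
        List.append_nil]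
      rw [rstrip_append_space, rstrip_eq_self p hps]
      simp [PySem.Chars.join, List.intercalate]
    · have ht : PySem.Chars.rstrip ((List.map (fun x => x ++ [' ']) (q :: qs)).flatten) =
          PySem.Chars.join [' '] (q :: qs) :=
        ih (by simp) (fun r hr => h r (List.mem_cons_of_mem _ hr))
      have hjoin : PySem.Chars.join [' '] (q :: qs) ≠ [] := by
        obtain ⟨hq, _⟩ := h q (by simp)
        rcases qs with _ | ⟨r, rs⟩
        · simpa [PySem.Chars.join, List.intercalate] using hq
        · rw [PySem.Chars.join_cons_cons]
          simp [hq]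
      rw [List.map_cons, List.flatten_cons,
        rstrip_append_of_ne_nil _ _ (by rw [ht]; exact hjoin), ht,
        PySem.Chars.join_cons_cons]

theorem strip_flatten (ps : List (List Char))
    (h : ∀ p ∈ ps, p ≠ [] ∧ ∀ c ∈ p, PySem.Chars.isspace c = false) :
    PySem.Chars.strip ((ps.map (· ++ [' '])).flatten) = PySem.Chars.join [' '] ps := by
  rcases ps with _ | ⟨p, ps⟩
  · decide
  · obtain ⟨hp, hps⟩ := h p (by simp)
    rcases e : p with _ | ⟨c, cs⟩
    · exact absurd e hp
    · subst e
      have hc : PySem.Chars.isspace c = false := hps c (by simp)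
      unfold PySem.Chars.strip
      have hl : PySem.Chars.lstrip ((List.map (fun x => x ++ [' ']) ((c :: cs) :: ps)).flatten) =
          (List.map (fun x => x ++ [' ']) ((c :: cs) :: ps)).flatten := by
        unfold PySem.Chars.lstrip
        simp [hc]
      rw [hl]
      exact rstrip_flatten ((c :: cs) :: ps) (by simp) h

theorem aLoop_toList (xs : List Int) : ∀ (out : String),
    (arrayToStrLoop xs out).toList = out.toList ++ ((pvParts xs).map (· ++ [' '])).flatten := by
  induction xs with
  | nil => intro out; simp [arrayToStrLoop, pvParts]
  | cons x rest ih =>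
    intro out
    simp only [arrayToStrLoop, pvParts]
    split
    · simp
    · split
      · exact ih out
      · rw [ih]
        have : (" " : String).toList = [' '] := by decide
        simp [PySem.Int.toList_toStr, this]

theorem pvParts_eq (xs : List Int) :
    pvParts xs =
      ((xs.take (altCutLoop xs)).filter (fun x => !(x == 1))).map PySem.Int.toChars := by
  induction xs with
  | nil => simp [pvParts, altCutLoop]
  | cons x rest ih =>
    simp only [pvParts, altCutLoop]
    split
    · simp
    · rename_i hx0
      simp only [List.take_succ_cons, List.filter_cons]
      split
      · rename_i hx1
        rw [if_neg (by simpa using hx1)]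
        exact ih
      · rename_i hx1
        rw [if_pos (by simpa using hx1), List.map_cons, ih]

-- ===== VERDICT (by name: the statement is the Claim_ definition above) =====
theorem array_to_str_spec : Claim_equal_array_to_str := by
  intro arr _
  unfold Spec_array_to_str array_to_str array_to_str_alt
  unfold PySem.Str.strip PySem.Str.join
  apply congrArg String.ofList
  rw [aLoop_toList]
  have h0 : ("" : String).toList = [] := by decide
  rw [h0, List.nil_append, strip_flatten _ (pvParts_good arr)]
  rw [PySem.List.slice_to_natCast]
  have hsep : (" " : String).toList = [' '] := by decide
  rw [hsep]
  congr 1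
  rw [pvParts_eq]
  simp [PySem.Int.toList_toStr, Function.comp]
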